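-- pv_equiv track=rewrite | github.com/erickhammersmark/aoc | 2023/3/sol2.py | parse
-- ===== SOURCE A (Python) =====
-- def parse(line):
--     """
--                                    01234567890123456789
--     Parses a line that looks like "..27*..115......@@69." into structs like:
--     parts: [("*", (4,)), ("*", (16,)), ("*", (17,))]
--     numbers: [("27", (2, 3)), ("115", (7, 8, 9)), ("69", (18, 19))]
--     """
--     parts = []
--     numbers = []
--     number = ""
--     positions = []
--     for idx, char  in enumerate(line):
--         if char.isdigit():
--             number = number + char
--             positions.append(idx)
--         else:
--             if number:
--                 numbers.append((number, tuple(positions)))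
--                 number = ""
--                 positions = []
--             if char == ".":
--                 continue
--             parts.append((char, (idx,)))
--     if number:
--         numbers.append((number, tuple(positions)))
--     return parts, numbers
-- ===== SOURCE B (Python) =====
-- def parse(line):
--     # Run-based scan: two-pointer extraction of maximal digit runs (no accumulator/flush logic).
--     parts = []
--     numbers = []
--     i, n = 0, len(line)
--     while i < n:
--         if line[i].isdigit():
--             j = i
--             while j < n and line[j].isdigit():
--                 j += 1
--             numbers.append((line[i:j], tuple(range(i, j))))
--             i = j
--         else:
--             if line[i] != ".":
--                 parts.append((line[i], (i,)))
--             i += 1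
--     return parts, numbers
-- ===== Notes on version B (the rewrite author's own statement) =====
-- stated objective: idiomatic
-- what changed: Replaces A's character-at-a-time accumulator with flush logic and a trailing-number special case by a run-based two-pointer scan that slices each maximal digit run directly.
import Mathlib
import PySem

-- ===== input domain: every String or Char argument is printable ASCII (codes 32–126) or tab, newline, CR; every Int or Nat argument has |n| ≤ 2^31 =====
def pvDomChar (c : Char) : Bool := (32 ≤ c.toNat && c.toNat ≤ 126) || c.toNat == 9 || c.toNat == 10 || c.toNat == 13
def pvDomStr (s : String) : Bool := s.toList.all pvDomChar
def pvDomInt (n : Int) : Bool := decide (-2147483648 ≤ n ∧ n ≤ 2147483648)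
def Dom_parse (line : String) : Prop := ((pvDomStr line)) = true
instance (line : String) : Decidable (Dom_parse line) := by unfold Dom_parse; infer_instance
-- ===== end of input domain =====

-- B replaces A's char-accumulator/flush parsing by a run-based scan over maximal digit runs (idiomatic decomposition, same cost).


-- ===== PORT A =====
-- loop state: (parts, numbers, number, positions)
def parseStep (st : (List (String × List Int)) × (List (String × List Int)) × String × List Int)
    (p : Int × Char) : (List (String × List Int)) × (List (String × List Int)) × String × List Int :=
  let (parts, numbers, number, positions) := st
  let (idx, char) := p
  if PySem.Chars.isdigit char then
    (parts, numbers, number ++ String.singleton char, positions ++ [idx])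
  else
    let (numbers, number, positions) :=
      if number ≠ "" then (numbers ++ [(number, positions)], "", ([] : List Int))
      else (numbers, number, positions)
    if char == '.' then (parts, numbers, number, positions)
    else (parts ++ [(String.singleton char, [idx])], numbers, number, positions)

def parse (line : String) : (List (String × List Int)) × (List (String × List Int)) :=
  let st := (PySem.List.enumerate line.toList 0).foldl parseStep ([], [], "", [])
  (st.1, if st.2.2.1 ≠ "" then st.2.1 ++ [(st.2.2.1, st.2.2.2)] else st.2.1)

-- ===== PORT B =====
-- run-based scan of Source B: i is the line index of the first char of cs; a digit run is taken whole
def parseGo (i : Int) (cs : List Char) : (List (String × List Int)) × (List (String × List Int)) :=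
  match cs with
  | [] => ([], [])
  | c :: cs' =>
    if hd : PySem.Chars.isdigit c then
      let ds := (c :: cs').takeWhile PySem.Chars.isdigit
      let rest := (c :: cs').dropWhile PySem.Chars.isdigit
      let (p, nu) := parseGo (i + ds.length) rest
      (p, (String.ofList ds, PySem.List.pyRange i (i + ds.length) 1) :: nu)
    else
      let (p, nu) := parseGo (i + 1) cs'
      (if c ≠ '.' then (String.singleton c, [i]) :: p else p, nu)
termination_by cs.length
decreasing_by
  · simp only [List.dropWhile_cons, hd, if_pos]
    have := List.length_dropWhile_le (p := PySem.Chars.isdigit) (l := cs')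
    simp only [List.length_cons]; omega
  · simp

def parse_alt (line : String) : (List (String × List Int)) × (List (String × List Int)) :=
  parseGo 0 line.toList

-- ===== PRECONDITION & SPEC =====
def Spec_parse (line : String) (out : (List (String × List Int)) × (List (String × List Int))) : Prop := out = parse_alt line
instance (line : String) (out : (List (String × List Int)) × (List (String × List Int))) : Decidable (Spec_parse line out) := by unfold Spec_parse; infer_instance

-- ===== CLAIM (what is proved, stated in full; the proofs are below) =====
def Claim_equal_parse : Prop := ∀ (line : String), Dom_parse line → Spec_parse line (parse line)

-- ===== LEMMAS AND PROOFS =====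

-- A's final packaging of the loop state (proof-side abbreviation of parse's last line)
def finA (st : (List (String × List Int)) × (List (String × List Int)) × String × List Int) :
    (List (String × List Int)) × (List (String × List Int)) :=
  (st.1, if st.2.2.1 ≠ "" then st.2.1 ++ [(st.2.2.1, st.2.2.2)] else st.2.1)

theorem head_dropWhile_false {α : Type} (p : α → Bool) (l : List α) (r : α) (rest : List α)
    (h : l.dropWhile p = r :: rest) : p r = false := by
  have h0 : 0 < (l.dropWhile p).length := by rw [h]; simp
  have := List.dropWhile_get_zero_not (p := p) l h0
  have he : (l.dropWhile p).get ⟨0, h0⟩ = r := by simp [h]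
  rw [he] at this
  simpa using this

-- A's step on a non-digit char with a nonempty pending buffer: flush, then maybe record a part
theorem stepFlush (parts numbers : List (String × List Int)) (num : String) (pos : List Int)
    (idx : Int) (char : Char) (hc : PySem.Chars.isdigit char = false) (hn : num ≠ "") :
    parseStep (parts, numbers, num, pos) (idx, char)
      = (if char == '.' then parts else parts ++ [(String.singleton char, [idx])],
          numbers ++ [(num, pos)], "", []) := by
  simp only [parseStep, hc, Bool.false_eq_true, if_false, hn, not_false_iff, if_pos, ne_eq]
  by_cases hdot : char == '.' <;> simp [hdot]

-- A's step on a non-digit char with an empty pending buffer: maybe record a part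
theorem stepNoFlush (parts numbers : List (String × List Int)) (idx : Int) (char : Char)
    (hc : PySem.Chars.isdigit char = false) :
    parseStep (parts, numbers, "", []) (idx, char)
      = (if char == '.' then parts else parts ++ [(String.singleton char, [idx])],
          numbers, "", []) := by
  by_cases hdot : char == '.' <;> simp [parseStep, hc, hdot]

-- folding A's step over a pure digit run just extends the pending buffer
theorem runA (ds : List Char) (hds : ∀ c ∈ ds, PySem.Chars.isdigit c = true) :
    ∀ (i : Int) (parts numbers : List (String × List Int)) (num : String) (pos : List Int),
      (PySem.List.enumerate ds i).foldl parseStep (parts, numbers, num, pos)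
        = (parts, numbers, num ++ String.ofList ds, pos ++ PySem.List.pyRange i (i + ds.length) 1) := by
  induction ds with
  | nil =>
    intro i parts numbers num pos
    simp [PySem.List.enumerate_nil, PySem.List.pyRange_one_eq_nil (by omega : i ≤ i)]
  | cons c cs ih =>
    intro i parts numbers num pos
    have hc : PySem.Chars.isdigit c = true := hds c (by simp)
    rw [PySem.List.enumerate_cons]
    simp only [List.foldl_cons, parseStep, hc, if_pos]
    rw [ih (fun d hd => hds d (by simp [hd])) (i + 1) parts numbers
      (num ++ String.singleton c) (pos ++ [i])]
    have hr : PySem.List.pyRange i (i + ((c :: cs).length : Int)) 1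
        = i :: PySem.List.pyRange (i + 1) (i + ((c :: cs).length : Int)) 1 := by
      apply PySem.List.pyRange_one_cons; simp only [List.length_cons]; push_cast; omega
    rw [hr]
    have hb : PySem.List.pyRange (i + 1) (i + 1 + (cs.length : Int)) 1
        = PySem.List.pyRange (i + 1) (i + ((c :: cs).length : Int)) 1 := by
      congr 1; simp only [List.length_cons]; push_cast; ring
    rw [hb]
    refine Prod.ext rfl (Prod.ext rfl (Prod.ext ?_ ?_))
    · apply String.ext; simp
    · simp

-- the main correspondence: A's fold from an empty pending buffer = B's run scan
theorem mainAux (cs : List Char) (i : Int) (parts numbers : List (String × List Int)) :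
    finA ((PySem.List.enumerate cs i).foldl parseStep (parts, numbers, "", []))
      = (parts ++ (parseGo i cs).1, numbers ++ (parseGo i cs).2) := by
  cases cs with
  | nil => simp [PySem.List.enumerate_nil, parseGo, finA]
  | cons c cs' =>
    by_cases hd : PySem.Chars.isdigit c = true
    · -- digit head: split c :: cs' into its maximal digit run and the remainder
      have hsplit : c :: cs' = (c :: cs').takeWhile PySem.Chars.isdigit
          ++ (c :: cs').dropWhile PySem.Chars.isdigit :=
        (List.takeWhile_append_dropWhile).symm
      have htw : (c :: cs').takeWhile PySem.Chars.isdigit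
          = c :: cs'.takeWhile PySem.Chars.isdigit := by
        simp [hd]
      have hdw : (c :: cs').dropWhile PySem.Chars.isdigit
          = cs'.dropWhile PySem.Chars.isdigit := by
        simp [hd]
      have hds : ∀ d ∈ (c :: cs').takeWhile PySem.Chars.isdigit,
          PySem.Chars.isdigit d = true := fun d hdm => List.mem_takeWhile_imp hdm
      have hne : String.ofList ((c :: cs').takeWhile PySem.Chars.isdigit) ≠ "" := by
        rw [htw]; simp
      conv_lhs => rw [hsplit]
      rw [PySem.List.enumerate_append, List.foldl_append,
        runA _ hds i parts numbers "" []]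
      simp only [String.empty_append, List.nil_append]
      rw [parseGo]
      simp only [hd, dif_pos]
      cases hrest : (c :: cs').dropWhile PySem.Chars.isdigit with
      | nil =>
        simp [PySem.List.enumerate_nil, parseGo, finA, hne]
      | cons r rest' =>
        have hr : PySem.Chars.isdigit r = false := by
          rw [hdw] at hrest
          exact head_dropWhile_false _ _ _ _ hrest
        rw [PySem.List.enumerate_cons, List.foldl_cons, stepFlush _ _ _ _ _ _ hr hne]
        rw [parseGo]
        simp only [hr, Bool.false_eq_true, dif_neg, not_false_iff]
        by_cases hdot : r = '.'
        · simp only [hdot, beq_self_eq_true, if_pos, ne_eq, not_true_eq_false, if_false]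
          rw [mainAux rest'
            (i + ((c :: cs').takeWhile PySem.Chars.isdigit).length + 1) parts
            (numbers ++ [(String.ofList ((c :: cs').takeWhile PySem.Chars.isdigit),
              PySem.List.pyRange i (i + ((c :: cs').takeWhile PySem.Chars.isdigit).length) 1)])]
          simp
        · have hbeq : (r == '.') = false := by simp [hdot]
          simp only [hbeq, Bool.false_eq_true, if_false, ne_eq, hdot, not_false_iff, if_pos]
          rw [mainAux rest'
            (i + ((c :: cs').takeWhile PySem.Chars.isdigit).length + 1)
            (parts ++ [(String.singleton r, [i + ((c :: cs').takeWhile PySem.Chars.isdigit).length])])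
            (numbers ++ [(String.ofList ((c :: cs').takeWhile PySem.Chars.isdigit),
              PySem.List.pyRange i (i + ((c :: cs').takeWhile PySem.Chars.isdigit).length) 1)])]
          simp
    · -- non-digit head: pending buffer is empty, so no flush happens
      have hd' : PySem.Chars.isdigit c = false := by simpa using hd
      rw [PySem.List.enumerate_cons, List.foldl_cons, stepNoFlush _ _ _ _ hd']
      rw [parseGo]
      simp only [hd', Bool.false_eq_true, dif_neg, not_false_iff]
      by_cases hdot : c = '.'
      · simp only [hdot, beq_self_eq_true, if_pos, ne_eq, not_true_eq_false, if_false]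
        rw [mainAux cs' (i + 1) parts numbers]
      · have hbeq : (c == '.') = false := by simp [hdot]
        simp only [hbeq, Bool.false_eq_true, if_false, ne_eq, hdot, not_false_iff, if_pos]
        rw [mainAux cs' (i + 1) (parts ++ [(String.singleton c, [i])]) numbers]
        simp
termination_by cs.length
decreasing_by
  · have hlen := List.length_dropWhile_le (p := PySem.Chars.isdigit) (l := cs')
    rw [hdw] at hrest
    rw [hrest] at hlen
    simp only [List.length_cons] at *
    omega
  · have hlen := List.length_dropWhile_le (p := PySem.Chars.isdigit) (l := cs')
    rw [hdw] at hrest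
    rw [hrest] at hlen
    simp only [List.length_cons] at *
    omega
  · simp
  · simp

-- ===== VERDICT (by name: the statement is the Claim_ definition above) =====
theorem parse_spec : Claim_equal_parse := by
  intro line _
  unfold Spec_parse parse parse_alt
  simpa [finA] using mainAux line.toList 0 [] []
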